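-- pv_equiv track=rewrite | github.com/jbarry1990/AdventOfCode | Day 14/Puzzle14b.py | DetermineMasks
-- ===== SOURCE A (Python) =====
-- def DetermineMasks(Mask):
--     Masks =[]
--     Locations = []
--
--     for Index, Bit in enumerate(Mask):
--         if Bit == "X":
--             Locations.append(Index)
--
--     NumberOfX = len(Locations)
--     NumberOfVariations = 2**NumberOfX
--
--     Variations = []
--     for BinaryNumber in range(0,NumberOfVariations):
--         Variations.append(format(BinaryNumber, "0" + str(NumberOfX) + "b"))
--
--     NewMask = list(Mask)
--     for Variation in Variations:
--         for Index, Location in enumerate(Locations):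
--             NewMask[Location] = Variation[Index]
--         Masks.append("".join(NewMask))
--
--     return Masks
-- ===== SOURCE B (Python) =====
-- def DetermineMasks(Mask):
--     # One left-to-right pass expanding prefixes: plain characters are buffered, and
--     # each 'X' flushes the buffer and doubles the prefix list ('0' branch before '1'),
--     # so the final order is binary counting order.
--     results = [[]]
--     buf = []
--     for c in Mask:
--         if c == "X":
--             results = [p + buf + [b] for p in results for b in "01"]
--             buf = []
--         else:
--             buf.append(c)
--     return ["".join(p + buf) for p in results]
-- ===== Notes on version B (the rewrite author's own statement) =====
-- stated objective: alternative
-- what changed: Replaces A's three-phase scheme (collect X indices, generate all zero-padded binary strings via format, then patch a mutable char list per variation) by a single left-to-right pass that buffers plain characters and, at each 'X', flushes the buffer and doubles a list of prefixes ('0' branch before '1'), reproducing A's binary counting order with no index bookkeeping or format calls.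
import Mathlib
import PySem

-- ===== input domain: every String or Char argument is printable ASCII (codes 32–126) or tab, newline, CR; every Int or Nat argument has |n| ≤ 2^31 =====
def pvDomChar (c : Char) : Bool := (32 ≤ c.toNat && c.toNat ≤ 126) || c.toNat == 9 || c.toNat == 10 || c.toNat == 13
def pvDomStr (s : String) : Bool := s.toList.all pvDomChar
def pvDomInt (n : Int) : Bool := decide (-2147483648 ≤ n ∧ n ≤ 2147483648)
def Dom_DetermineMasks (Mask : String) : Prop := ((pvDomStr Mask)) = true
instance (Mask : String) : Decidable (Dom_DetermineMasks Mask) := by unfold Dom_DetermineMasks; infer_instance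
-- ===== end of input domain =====

-- B replaces A's three-phase scheme (X-index list, format-generated binary strings,
-- per-variation patching of a mutable char list) by a single left-to-right prefix-expansion
-- pass; objective: alternative (same asymptotic cost).

-- ===== PORT A =====

-- format(n, "b"): binary digits of n, MSB first ([] for 0; the n = 0 case is padded below).
-- Hand port of the builtin 'format'; exact for n ≥ 0.
def pvBinDigits : Nat → List Char
  | 0 => []
  | n+1 => pvBinDigits ((n+1)/2) ++ [if (n+1) % 2 = 1 then '1' else '0']
decreasing_by exact Nat.div_lt_self (Nat.succ_pos n) (by norm_num)

-- format(n, "b") always prints at least one digit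
def pvDs (n : Nat) : List Char := if n = 0 then ['0'] else pvBinDigits n

-- format(n, "0" + str(k) + "b"): binary of n left-padded with '0' to width k; exact for n ≥ 0.
def pvFormatBin (k : Nat) (n : Nat) : List Char :=
  List.replicate (k - (pvDs n).length) '0' ++ pvDs n

def DetermineMasks (Mask : String) : List String :=
  let cs := Mask.toList
  -- for Index, Bit in enumerate(Mask): if Bit == "X": Locations.append(Index)
  let Locations : List Int :=
    (PySem.List.enumerate cs 0).foldl (fun L ib => if ib.2 = 'X' then L ++ [ib.1] else L) []
  let NumberOfX := Locations.length
  let NumberOfVariations := 2 ^ NumberOfX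
  -- range(0, NumberOfVariations) over nonnegative numbers: List.range is exact here
  let Variations : List (List Char) :=
    (List.range NumberOfVariations).foldl (fun vs n => vs ++ [pvFormatBin NumberOfX n]) []
  -- NewMask[Location] = Variation[Index]; both indices are provably nonnegative and in
  -- range (Python would raise otherwise), so List.set/getD on .toNat are exact here.
  let result := Variations.foldl
    (fun (st : List Char × List String) v =>
      let nm := (PySem.List.enumerate Locations 0).foldl
        (fun m il => m.set il.2.toNat (v.getD il.1.toNat ' ')) st.1
      (nm, st.2 ++ [String.mk nm]))
    (cs, [])
  result.2

-- ===== PORT B =====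
-- loop body of Source B: buffer plain chars, flush the buffer and double the prefixes at 'X'
def pvStepB (st : List (List Char) × List Char) (c : Char) : List (List Char) × List Char :=
  if c = 'X' then
    (st.1.flatMap (fun p => (['0', '1'] : List Char).map (fun b => p ++ st.2 ++ [b])), [])
  else
    (st.1, st.2 ++ [c])

def DetermineMasks_alt (Mask : String) : List String :=
  let st := Mask.toList.foldl pvStepB ([[]], [])
  st.1.map (fun p => String.mk (p ++ st.2))

-- ===== PRECONDITION & SPEC =====
def Spec_DetermineMasks (Mask : String) (out : List String) : Prop := out = DetermineMasks_alt Mask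
instance (Mask : String) (out : List String) : Decidable (Spec_DetermineMasks Mask out) := by unfold Spec_DetermineMasks; infer_instance

-- ===== CLAIM (what is proved, stated in full; the proofs are below) =====
def Claim_equal_DetermineMasks : Prop := ∀ (Mask : String), Dom_DetermineMasks Mask → Spec_DetermineMasks Mask (DetermineMasks Mask)

-- ===== LEMMAS AND PROOFS =====

-- The canonical result: all fillings of the mask, '0' before '1', left X as most significant.
def pvMasks : List Char → List (List Char)
  | [] => [[]]
  | c :: cs =>
    if c = 'X' then (pvMasks cs).map ('0' :: ·) ++ (pvMasks cs).map ('1' :: ·)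
    else (pvMasks cs).map (c :: ·)

-- positions of 'X' in a char list
def pvXpos : List Char → List Nat
  | [] => []
  | c :: cs => if c = 'X' then 0 :: (pvXpos cs).map (· + 1) else (pvXpos cs).map (· + 1)

-- sequential write of v's chars at positions L
def pvApply : List Char → List Char → List Nat → List Char
  | m, _, [] => m
  | m, v, loc :: L => pvApply (m.set loc (v.headD ' ')) v.tail L

theorem pvRepl (a : Char) (m : Nat) : List.replicate m a ++ [a] = List.replicate (m+1) a :=
  List.replicate_succ'.symm

theorem pvBinDigits_pos (n : Nat) (h : n ≠ 0) :
    pvBinDigits n = pvBinDigits (n/2) ++ [if n % 2 = 1 then '1' else '0'] := by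
  cases n with
  | zero => exact absurd rfl h
  | succ m => rw [pvBinDigits]

theorem pvBinDigits_len {k n : Nat} (h : n < 2 ^ k) : (pvBinDigits n).length ≤ k := by
  induction k generalizing n with
  | zero =>
    interval_cases n
    simp [pvBinDigits]
  | succ k ih =>
    by_cases hn : n = 0
    · simp [hn, pvBinDigits]
    · rw [pvBinDigits_pos n hn]
      have h2 : n / 2 < 2 ^ k := by
        have := Nat.div_lt_div_of_lt_of_dvd (by exact ⟨2^k, by ring⟩ : 2 ∣ 2^(k+1)) h
        simpa [Nat.pow_succ, Nat.mul_div_cancel] using this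
      have := ih h2
      simp [List.length_append]
      omega

theorem pvFormatBin_len {k n : Nat} (hk : 1 ≤ k) (h : n < 2 ^ k) :
    (pvFormatBin k n).length = k := by
  unfold pvFormatBin pvDs
  by_cases hn : n = 0
  · simp [hn]; omega
  · have := pvBinDigits_len h
    have hpos : (pvBinDigits n).length ≥ 1 := by
      rw [pvBinDigits_pos n hn]; simp
    simp [hn, List.length_append]
    omega

theorem pvFormatBin_zero_succ (k : Nat) (hk : 1 ≤ k) (n : Nat) (h : n < 2 ^ k) :
    pvFormatBin (k+1) n = '0' :: pvFormatBin k n := by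
  unfold pvFormatBin
  have hd : (pvDs n).length ≤ k := by
    unfold pvDs
    by_cases hn : n = 0
    · simpa [hn] using hk
    · simpa [hn] using pvBinDigits_len h
  rw [show k + 1 - (pvDs n).length = (k - (pvDs n).length) + 1 from by omega,
    List.replicate_succ]
  simp

theorem pvFormatBin_shift (k : Nat) (hk : 1 ≤ k) (n : Nat) (h : n < 2 ^ (k+1)) :
    pvFormatBin k (n / 2) ++ [if n % 2 = 1 then '1' else '0'] = pvFormatBin (k+1) n := by
  by_cases hn : n = 0
  · subst hn
    unfold pvFormatBin pvDs
    simp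
    rw [show (['0','0'] : List Char) = ['0'] ++ ['0'] from rfl, ← List.append_assoc,
      pvRepl, show k - 1 + 1 = k from by omega]
  · by_cases hn2 : n / 2 = 0
    · have h1 : n = 1 := by omega
      subst h1
      unfold pvFormatBin pvDs
      simp [pvBinDigits]
      rw [show (['0','1'] : List Char) = ['0'] ++ ['1'] from rfl, ← List.append_assoc,
        pvRepl, show k - 1 + 1 = k from by omega]
    · unfold pvFormatBin pvDs
      have hds : pvBinDigits n = pvBinDigits (n/2) ++ [if n % 2 = 1 then '1' else '0'] :=
        pvBinDigits_pos n hn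
      simp only [hn, hn2, if_false]
      rw [hds]
      rw [List.length_append, List.length_singleton]
      rw [show k + 1 - ((pvBinDigits (n/2)).length + 1) = k - (pvBinDigits (n/2)).length from by omega]
      simp [List.append_assoc]

theorem pvBinDigits_add_pow (k : Nat) (hk : 1 ≤ k) (n : Nat) (h : n < 2 ^ k) :
    pvBinDigits (2 ^ k + n) = '1' :: pvFormatBin k n := by
  induction k generalizing n with
  | zero => omega
  | succ k ih =>
    by_cases hk0 : k = 0
    · subst hk0
      interval_cases n
      · simp [pvBinDigits, pvFormatBin, pvDs]
      · simp [pvBinDigits, pvFormatBin, pvDs]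
    · have hk1 : 1 ≤ k := by omega
      have hne : 2 ^ (k+1) + n ≠ 0 := by positivity
      rw [pvBinDigits_pos _ hne]
      have hdiv : (2 ^ (k+1) + n) / 2 = 2 ^ k + n / 2 := by
        rw [Nat.pow_succ]
        omega
      have hmod : (2 ^ (k+1) + n) % 2 = n % 2 := by
        rw [Nat.pow_succ]
        omega
      rw [hdiv, hmod, ih hk1 (n/2) (by omega)]
      rw [List.cons_append]
      rw [pvFormatBin_shift k hk1 n h]

theorem pvFormatBin_one_succ (k : Nat) (hk : 1 ≤ k) (n : Nat) (h : n < 2 ^ k) :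
    pvFormatBin (k+1) (2 ^ k + n) = '1' :: pvFormatBin k n := by
  unfold pvFormatBin pvDs
  have hne : 2 ^ k + n ≠ 0 := by positivity
  simp only [hne, if_false]
  rw [pvBinDigits_add_pow k hk n h]
  have : ('1' :: pvFormatBin k n).length = k + 1 := by
    simp [pvFormatBin_len hk h]
  rw [this]
  simp [pvFormatBin, pvDs]

-- pvApply lemmas
theorem pvApply_nil (m v : List Char) : pvApply m v [] = m := rfl

theorem pvApply_map_succ (L : List Nat) (a : Char) (m v : List Char) :
    pvApply (a :: m) v (L.map (· + 1)) = a :: pvApply m v L := by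
  induction L generalizing m v with
  | nil => rfl
  | cons loc L ih => simp [pvApply, List.set_cons_succ, ih]

theorem pvApply_length (L : List Nat) (m v : List Char) :
    (pvApply m v L).length = m.length := by
  induction L generalizing m v with
  | nil => rfl
  | cons loc L ih => simp [pvApply, ih]

theorem pvApply_getElem?_not_mem (L : List Nat) (m v : List Char) :
    ∀ p, p ∉ L → (pvApply m v L)[p]? = m[p]? := by
  induction L generalizing m v with
  | nil => intro p _; rfl
  | cons loc L ih =>
    intro p hp
    simp only [List.mem_cons, not_or] at hp
    simp only [pvApply]
    rw [ih _ _ p hp.2, List.getElem?_set_ne (by omega)]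

theorem pvApply_congr (L : List Nat) (m₁ m₂ v : List Char)
    (hlen : m₁.length = m₂.length) (hag : ∀ p, p ∉ L → m₁[p]? = m₂[p]?) :
    pvApply m₁ v L = pvApply m₂ v L := by
  induction L generalizing m₁ m₂ v with
  | nil =>
    apply List.ext_getElem?
    intro p
    exact hag p (by simp)
  | cons loc L ih =>
    simp only [pvApply]
    apply ih
    · simp [hlen]
    · intro p hp
      by_cases hploc : p = loc
      · subst hploc
        rw [List.getElem?_set, List.getElem?_set]
        simp [hlen]
      · rw [List.getElem?_set_ne (fun h => hploc h.symm),
          List.getElem?_set_ne (fun h => hploc h.symm)]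
        exact hag p (by simp [hploc, hp])

-- the port's first loop computes the X positions
theorem pvLocations_eq (cs : List Char) (s : Int) :
    (PySem.List.enumerate cs s).foldl (fun L ib => if ib.2 = 'X' then L ++ [ib.1] else L) []
      = (pvXpos cs).map (fun p : Nat => s + p) := by
  rw [PySem.List.foldl_append_ite (p := fun ib : Int × Char => ib.2 = 'X') (f := Prod.fst)]
  simp only [List.nil_append]
  induction cs generalizing s with
  | nil => simp [PySem.List.enumerate_nil, pvXpos]
  | cons c cs ih =>
    rw [PySem.List.enumerate_cons]
    by_cases hc : c = 'X'
    · subst hc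
      simp only [pvXpos, List.filter_cons, decide_eq_true_eq, if_true, List.map_cons]
      rw [ih (s+1)]
      simp only [List.map_cons, List.map_map]
      congr 1
      · simp
      · apply List.map_congr_left
        intro p _
        simp only [Function.comp_apply]
        push_cast
        ring
    · simp only [pvXpos, hc, List.filter_cons, decide_eq_true_eq, if_false]
      rw [ih (s+1), List.map_map]
      apply List.map_congr_left
      intro p _
      simp only [Function.comp_apply]
      push_cast
      ring

theorem pvGetD_drop (v : List Char) (s : Nat) : v.getD s ' ' = (v.drop s).headD ' ' := by
  induction v generalizing s with
  | nil => simp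
  | cons a w ih =>
    cases s with
    | zero => simp
    | succ s => simpa using ih s

-- the port's inner loop is pvApply
theorem pvInner_eq (L : List Nat) (s : Nat) (m v : List Char) :
    (PySem.List.enumerate (L.map (fun p : Nat => (p : Int))) s).foldl
        (fun m il => m.set il.2.toNat (v.getD il.1.toNat ' ')) m
      = pvApply m (v.drop s) L := by
  induction L generalizing s m with
  | nil => simp [PySem.List.enumerate_nil, pvApply]
  | cons loc L ih =>
    rw [List.map_cons, PySem.List.enumerate_cons]
    simp only [List.foldl_cons, Int.toNat_natCast]
    rw [show ((s : Int) + 1) = ((s + 1 : Nat) : Int) from by push_cast; ring, ih (s+1)]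
    simp only [pvApply]
    rw [pvGetD_drop, List.tail_drop]

-- the variations loop in map form
theorem pvVariations_eq (k N : Nat) :
    (List.range N).foldl (fun vs n => vs ++ [pvFormatBin k n]) []
      = (List.range N).map (pvFormatBin k) := by
  rw [PySem.List.foldl_append_singleton_eq_map]
  simp

-- core correspondence on the A side
theorem pvMainA (cs : List Char) :
    (List.range (2 ^ (pvXpos cs).length)).map
        (fun n => pvApply cs (pvFormatBin (pvXpos cs).length n) (pvXpos cs))
      = pvMasks cs := by
  induction cs with
  | nil => simp [pvXpos, pvApply, pvMasks, List.range_succ]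
  | cons c cs ih =>
    by_cases hc : c = 'X'
    · subst hc
      have hx : pvXpos ('X' :: cs) = 0 :: (pvXpos cs).map (· + 1) := by simp [pvXpos]
      have hm : pvMasks ('X' :: cs)
          = (pvMasks cs).map ('0' :: ·) ++ (pvMasks cs).map ('1' :: ·) := by simp [pvMasks]
      rw [hx, hm]
      rw [show (0 :: (pvXpos cs).map (· + 1)).length = (pvXpos cs).length + 1 from by simp]
      rw [show (2:Nat) ^ ((pvXpos cs).length + 1)
            = 2 ^ (pvXpos cs).length + 2 ^ (pvXpos cs).length from by ring]
      rw [List.range_add, List.map_append, List.map_map]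
      congr 1
      · rw [← ih, List.map_map]
        apply List.map_congr_left
        intro n hn
        have hn' : n < 2 ^ (pvXpos cs).length := List.mem_range.mp hn
        simp only [Function.comp_apply, pvApply, List.set_cons_zero]
        rw [pvApply_map_succ]
        have hhead : (pvFormatBin ((pvXpos cs).length + 1) n).headD ' ' = '0' ∧
            pvApply cs (pvFormatBin ((pvXpos cs).length + 1) n).tail (pvXpos cs)
              = pvApply cs (pvFormatBin (pvXpos cs).length n) (pvXpos cs) := by
          by_cases hk0 : (pvXpos cs).length = 0
          · have hnil : pvXpos cs = [] := List.eq_nil_of_length_eq_zero hk0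
            have hn1 : n < 1 := by simpa [hk0] using hn'
            have hn0 : n = 0 := by omega
            subst hn0
            refine ⟨?_, by simp [hnil, pvApply_nil]⟩
            rw [hk0]
            simp [pvFormatBin, pvDs, pvBinDigits]
          · rw [pvFormatBin_zero_succ (pvXpos cs).length (by omega) n hn']
            exact ⟨rfl, rfl⟩
        rw [hhead.1, hhead.2]
      · rw [← ih]
        rw [List.map_map]
        apply List.map_congr_left
        intro n hn
        have hn' : n < 2 ^ (pvXpos cs).length := List.mem_range.mp hn
        simp only [Function.comp_apply, pvApply, List.set_cons_zero]
        rw [pvApply_map_succ]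
        have hhead : (pvFormatBin ((pvXpos cs).length + 1) (2 ^ (pvXpos cs).length + n)).headD ' ' = '1' ∧
            pvApply cs (pvFormatBin ((pvXpos cs).length + 1) (2 ^ (pvXpos cs).length + n)).tail (pvXpos cs)
              = pvApply cs (pvFormatBin (pvXpos cs).length n) (pvXpos cs) := by
          by_cases hk0 : (pvXpos cs).length = 0
          · have hnil : pvXpos cs = [] := List.eq_nil_of_length_eq_zero hk0
            have hn1 : n < 1 := by simpa [hk0] using hn'
            have hn0 : n = 0 := by omega
            subst hn0
            have hb1 : pvBinDigits 1 = ['1'] := by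
              rw [pvBinDigits_pos 1 one_ne_zero]
              simp [pvBinDigits]
            refine ⟨?_, by simp [hnil, pvApply_nil]⟩
            rw [hk0]
            simp [pvFormatBin, pvDs, hb1]
          · rw [pvFormatBin_one_succ (pvXpos cs).length (by omega) n hn']
            exact ⟨rfl, rfl⟩
        rw [hhead.1, hhead.2]
    · have hx : pvXpos (c :: cs) = (pvXpos cs).map (· + 1) := by simp [pvXpos, hc]
      have hm : pvMasks (c :: cs) = (pvMasks cs).map (c :: ·) := by simp [pvMasks, hc]
      rw [hx, hm, List.length_map, ← ih, List.map_map]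
      apply List.map_congr_left
      intro n _
      exact pvApply_map_succ _ _ _ _

-- the outer loop of A, with the carried NewMask replaced by the pristine mask
theorem pvOuter_eq (L : List Nat) (cs : List Char) (vs : List (List Char))
    (m : List Char) (acc : List String)
    (hlen : m.length = cs.length) (hag : ∀ p, p ∉ L → m[p]? = cs[p]?) :
    (vs.foldl (fun (st : List Char × List String) v =>
        (pvApply st.1 v L, st.2 ++ [String.mk (pvApply st.1 v L)])) (m, acc)).2
      = acc ++ vs.map (fun v => String.mk (pvApply cs v L)) := by
  induction vs generalizing m acc with
  | nil => simp
  | cons v vs ih =>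
    simp only [List.foldl_cons, List.map_cons]
    have heq : pvApply m v L = pvApply cs v L := pvApply_congr L m cs v hlen hag
    rw [heq, ih (pvApply cs v L) _ (by rw [pvApply_length]) ?_]
    · simp
    · intro p hp
      rw [pvApply_getElem?_not_mem L cs v p hp]

-- A computes map String.mk ∘ pvMasks
theorem pvA_eq (Mask : String) :
    DetermineMasks Mask = (pvMasks Mask.toList).map String.mk := by
  unfold DetermineMasks
  simp only []
  rw [pvLocations_eq Mask.toList 0]
  have hzero : (pvXpos Mask.toList).map (fun p : Nat => (0:Int) + p)
      = (pvXpos Mask.toList).map (fun p : Nat => (p : Int)) := by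
    apply List.map_congr_left; intro p _; omega
  rw [hzero]
  rw [List.length_map]
  rw [pvVariations_eq]
  have hinner : ∀ (m v : List Char),
      (PySem.List.enumerate ((pvXpos Mask.toList).map (fun p : Nat => (p : Int))) 0).foldl
          (fun m il => m.set il.2.toNat (v.getD il.1.toNat ' ')) m
        = pvApply m v (pvXpos Mask.toList) := by
    intro m v
    have h := pvInner_eq (pvXpos Mask.toList) 0 m v
    simpa using h
  have hstep :
      (fun (st : List Char × List String) (v : List Char) =>
        ((PySem.List.enumerate ((pvXpos Mask.toList).map (fun p : Nat => (p : Int))) 0).foldl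
            (fun m il => m.set il.2.toNat (v.getD il.1.toNat ' ')) st.1,
         st.2 ++ [String.mk ((PySem.List.enumerate ((pvXpos Mask.toList).map (fun p : Nat => (p : Int))) 0).foldl
            (fun m il => m.set il.2.toNat (v.getD il.1.toNat ' ')) st.1)]))
      = (fun (st : List Char × List String) (v : List Char) =>
        (pvApply st.1 v (pvXpos Mask.toList), st.2 ++ [String.mk (pvApply st.1 v (pvXpos Mask.toList))])) := by
    funext st v
    rw [hinner st.1 v]
  rw [hstep]
  rw [pvOuter_eq (pvXpos Mask.toList) Mask.toList _ Mask.toList [] rfl (fun _ _ => rfl)]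
  rw [List.nil_append, List.map_map, ← pvMainA Mask.toList, List.map_map]
  rfl

-- B computes map String.mk ∘ pvMasks
theorem pvB_fold (cs : List Char) (R : List (List Char)) (buf : List Char) :
    (cs.foldl pvStepB (R, buf)).1.map (fun p => p ++ (cs.foldl pvStepB (R, buf)).2)
      = R.flatMap (fun p => (pvMasks cs).map (fun t => p ++ (buf ++ t))) := by
  induction cs generalizing R buf with
  | nil =>
    simp only [List.foldl_nil, pvMasks, List.map_cons, List.map_nil, List.append_nil]
    induction R with
    | nil => rfl
    | cons p R ihR => simp_all
  | cons c cs ih =>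
    simp only [List.foldl_cons]
    by_cases hc : c = 'X'
    · subst hc
      rw [show pvStepB (R, buf) 'X'
            = (R.flatMap (fun p => (['0', '1'] : List Char).map (fun b => p ++ buf ++ [b])), [])
          from rfl]
      rw [ih]
      rw [show pvMasks ('X' :: cs)
            = (pvMasks cs).map ('0' :: ·) ++ (pvMasks cs).map ('1' :: ·) from by simp [pvMasks]]
      rw [List.flatMap_assoc]
      apply List.flatMap_congr
      intro p _
      simp [List.map_map, List.append_assoc, Function.comp_def]
    · rw [show pvStepB (R, buf) c = (R, buf ++ [c]) from by simp [pvStepB, hc]]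
      rw [ih]
      rw [show pvMasks (c :: cs) = (pvMasks cs).map (c :: ·) from by simp [pvMasks, hc]]
      apply List.flatMap_congr
      intro p _
      simp [List.map_map, List.append_assoc, Function.comp_def]

theorem pvB_eq (Mask : String) :
    DetermineMasks_alt Mask = (pvMasks Mask.toList).map String.mk := by
  unfold DetermineMasks_alt
  simp only []
  rw [show (fun p => String.mk (p ++ (Mask.toList.foldl pvStepB ([[]], [])).2))
        = String.mk ∘ (fun p => p ++ (Mask.toList.foldl pvStepB ([[]], [])).2) from rfl]
  rw [← List.map_map, pvB_fold Mask.toList [[]] []]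
  simp

-- ===== VERDICT (by name: the statement is the Claim_ definition above) =====
theorem DetermineMasks_spec : Claim_equal_DetermineMasks := by
  intro Mask _
  unfold Spec_DetermineMasks
  rw [pvA_eq, pvB_eq]
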